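-- pv_equiv track=rewrite | github.com/NVIDIA/nv-ingest | src/nv_ingest/modules/transforms/nemo_doc_splitter.py | _split_into_units
-- ===== SOURCE A (Python) =====
-- from typing import List
-- from typing import Literal
--
-- def _split_into_units(text: str, split_by: Literal["word", "sentence", "passage"]) -> List[str]:
--     if split_by == "passage":
--         split_at = "\n\n"
--     elif split_by == "sentence":
--         split_at = "."  # why not ?,!, etc..?
--     elif split_by == "word":
--         split_at = " "
--     else:
--         raise NotImplementedError("DocumentSplitter only supports 'passage', 'sentence'" " or 'word' split_by options.")
--     units = text.split(split_at)
--     # Add the delimiter back to all units except the last one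
--     for i in range(len(units) - 1):
--         units[i] += split_at
--
--     return units
-- ===== SOURCE B (Python) =====
-- from typing import List
-- from typing import Literal
--
--
-- def _split_into_units(text: str, split_by: Literal["word", "sentence", "passage"]) -> List[str]:
--     if split_by == "passage":
--         split_at = "\n\n"
--     elif split_by == "sentence":
--         split_at = "."
--     elif split_by == "word":
--         split_at = " "
--     else:
--         raise NotImplementedError("DocumentSplitter only supports 'passage', 'sentence'" " or 'word' split_by options.")
--     # Single forward scan: find each delimiter occurrence and emit the unit with
--     # its trailing delimiter already attached; the final remainder keeps none.
--     units = []
--     rest = text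
--     while True:
--         idx = rest.find(split_at)
--         if idx == -1:
--             units.append(rest)
--             return units
--         cut = idx + len(split_at)
--         units.append(rest[:cut])
--         rest = rest[cut:]
-- ===== Notes on version B (the rewrite author's own statement) =====
-- stated objective: alternative
-- what changed: Replaces split-then-mutate (str.split followed by a loop re-appending the delimiter to every unit but the last) with a single forward scan that finds each delimiter occurrence and emits each unit with its trailing delimiter already attached.
import Mathlib
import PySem

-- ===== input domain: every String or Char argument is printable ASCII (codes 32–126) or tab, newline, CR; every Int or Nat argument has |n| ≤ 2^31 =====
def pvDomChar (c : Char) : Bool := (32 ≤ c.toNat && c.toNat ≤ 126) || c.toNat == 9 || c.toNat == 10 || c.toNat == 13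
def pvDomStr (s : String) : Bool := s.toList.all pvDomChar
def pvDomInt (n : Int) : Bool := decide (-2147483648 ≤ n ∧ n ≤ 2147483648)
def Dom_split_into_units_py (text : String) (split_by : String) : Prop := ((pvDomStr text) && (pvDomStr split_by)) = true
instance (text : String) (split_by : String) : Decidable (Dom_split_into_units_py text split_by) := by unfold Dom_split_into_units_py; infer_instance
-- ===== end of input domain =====

-- B replaces split-then-mutate with a single forward find-based scan that emits each
-- unit with its trailing delimiter already attached (alternative decomposition, same cost).


-- ===== PORT A =====
-- the if/elif chain choosing the delimiter (shared by both ports; 'none' = the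
-- NotImplementedError branch, excluded by Pre_)
def pvDelim (split_by : String) : Option String :=
  if split_by == "passage" then some "\n\n"
  else if split_by == "sentence" then some "."
  else if split_by == "word" then some " "
  else none

-- A's loop 'for i in range(len(units) - 1): units[i] += split_at' as structural
-- recursion: append the delimiter to every unit except the last.
def pvAddSep (sep : List Char) : List (List Char) → List (List Char)
  | [] => []
  | [u] => [u]
  | u :: v :: rest => (u ++ sep) :: pvAddSep sep (v :: rest)

def split_into_units_py (text : String) (split_by : String) : List String :=
  match pvDelim split_by with
  | none => []  -- Python raises NotImplementedError here; excluded by Pre_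
  | some split_at =>
      let units := PySem.Chars.splitOn text.toList split_at.toList
      (pvAddSep split_at.toList units).map String.mk

-- ===== PORT B =====
-- B's while-loop: find the next delimiter in the remaining text; cut the unit
-- (delimiter included) and continue on the remainder.  The 'sep = []' guard only
-- makes the recursion total; the delimiters used are nonempty.
def pvScan (sep : List Char) (rest : List Char) : List (List Char) :=
  if hsep : sep = [] then [rest]
  else
    let idx := PySem.Chars.find rest sep
    if hidx : idx = -1 then [rest]
    else
      let cut := idx.toNat + sep.length
      rest.take cut :: pvScan sep (rest.drop cut)
termination_by rest.length
decreasing_by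
  have hinf : sep <:+: rest := (PySem.Chars.find_ne_neg_one_iff rest sep).mp hidx
  have hnn : 0 ≤ PySem.Chars.find rest sep := (PySem.Chars.find_nonneg_iff rest sep).mpr hinf
  have hlen : sep.length ≤ (rest.drop (PySem.Chars.find rest sep).toNat).length :=
    (PySem.Chars.find_spec hnn).1.length_le
  have hfl : PySem.Chars.find rest sep ≤ rest.length := PySem.Chars.find_le_length rest sep
  have hpos : 0 < sep.length := List.length_pos_iff.mpr hsep
  rw [List.length_drop] at hlen
  rw [List.length_drop]
  omega

def split_into_units_py_alt (text : String) (split_by : String) : List String :=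
  match pvDelim split_by with
  | none => []  -- Python raises NotImplementedError here; excluded by Pre_
  | some split_at => (pvScan split_at.toList text.toList).map String.mk

-- ===== PRECONDITION & SPEC =====
-- Pre_ excludes exactly the split_by values on which Python A raises NotImplementedError.
def Pre_split_into_units_py (text : String) (split_by : String) : Prop :=
  split_by = "passage" ∨ split_by = "sentence" ∨ split_by = "word"
instance (text : String) (split_by : String) : Decidable (Pre_split_into_units_py text split_by) := by unfold Pre_split_into_units_py; infer_instance
def pvWitness_split_into_units_py : String × String := ("a b. c", "word")

def Spec_split_into_units_py (text : String) (split_by : String) (out : List String) : Prop := out = split_into_units_py_alt text split_by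
instance (text : String) (split_by : String) (out : List String) : Decidable (Spec_split_into_units_py text split_by out) := by unfold Spec_split_into_units_py; infer_instance

-- ===== CLAIM (what is proved, stated in full; the proofs are below) =====
def Claim_equal_split_into_units_py : Prop := ∀ (text : String) (split_by : String), Dom_split_into_units_py text split_by → Pre_split_into_units_py text split_by → Spec_split_into_units_py text split_by (split_into_units_py text split_by)

-- ===== LEMMAS AND PROOFS =====

-- the raw pieces of Python's str.split, in the same find-based recursion shape as pvScan
def pvPieces (sep : List Char) (rest : List Char) : List (List Char) :=
  if hsep : sep = [] then [rest]
  else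
    let idx := PySem.Chars.find rest sep
    if hidx : idx = -1 then [rest]
    else rest.take idx.toNat :: pvPieces sep (rest.drop (idx.toNat + sep.length))
termination_by rest.length
decreasing_by
  have hinf : sep <:+: rest := (PySem.Chars.find_ne_neg_one_iff rest sep).mp hidx
  have hnn : 0 ≤ PySem.Chars.find rest sep := (PySem.Chars.find_nonneg_iff rest sep).mpr hinf
  have hlen : sep.length ≤ (rest.drop (PySem.Chars.find rest sep).toNat).length :=
    (PySem.Chars.find_spec hnn).1.length_le
  have hfl : PySem.Chars.find rest sep ≤ rest.length := PySem.Chars.find_le_length rest sep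
  have hpos : 0 < sep.length := List.length_pos_iff.mpr hsep
  rw [List.length_drop] at hlen
  rw [List.length_drop]
  omega

lemma pvPieces_ne_nil (sep rest : List Char) : pvPieces sep rest ≠ [] := by
  rw [pvPieces]
  split_ifs with h1
  · simp
  · by_cases h2 : PySem.Chars.find rest sep = -1 <;> simp [h2]

lemma find_go_shift (sep : List Char) (hsep : sep ≠ []) (l : List Char) (k : Nat) :
    PySem.Chars.find.go sep l k =
      if PySem.Chars.find.go sep l 0 = -1 then -1 else PySem.Chars.find.go sep l 0 + k := by
  induction l generalizing k with
  | nil =>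
      simp [PySem.Chars.find.go, List.isEmpty_iff, hsep]
  | cons c t ih =>
      by_cases hp : sep.isPrefixOf (c :: t)
      · simp [PySem.Chars.find.go, hp]
      · rw [show PySem.Chars.find.go sep (c :: t) k = PySem.Chars.find.go sep t (k + 1) by
          simp [PySem.Chars.find.go, hp]]
        rw [show PySem.Chars.find.go sep (c :: t) 0 = PySem.Chars.find.go sep t 1 by
          simp [PySem.Chars.find.go, hp]]
        have hge : -1 ≤ PySem.Chars.find.go sep t 0 := PySem.Chars.neg_one_le_find t sep
        rw [ih (k + 1), ih 1]
        split_ifs <;> omega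

lemma find_nil_of_ne (sep : List Char) (hsep : sep ≠ []) :
    PySem.Chars.find [] sep = -1 := by
  simp [PySem.Chars.find, PySem.Chars.find.go, List.isEmpty_iff, hsep]

lemma find_of_prefix (sep : List Char) (l : List Char) (hsep : sep ≠ [])
    (hp : sep.isPrefixOf l = true) : PySem.Chars.find l sep = 0 := by
  cases l with
  | nil =>
      exact absurd (List.prefix_nil.mp (List.isPrefixOf_iff_prefix.mp hp)) hsep
  | cons c t => simp [PySem.Chars.find, PySem.Chars.find.go, hp]

lemma find_cons_not_prefix (sep : List Char) (c : Char) (t : List Char) (hsep : sep ≠ [])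
    (hp : ¬ sep.isPrefixOf (c :: t) = true) :
    PySem.Chars.find (c :: t) sep =
      if PySem.Chars.find t sep = -1 then -1 else PySem.Chars.find t sep + 1 := by
  show PySem.Chars.find.go sep (c :: t) 0 = _
  rw [show PySem.Chars.find.go sep (c :: t) 0 = PySem.Chars.find.go sep t 1 by
    simp [PySem.Chars.find.go, hp]]
  rw [find_go_shift sep hsep t 1]
  rfl

lemma splitOn_go_spec (sep : List Char) (hsep : sep ≠ []) :
    ∀ (fuel : Nat) (l cur acc : List Char) (accL : List (List Char)),
      l.length < fuel →
      PySem.Chars.splitOn.go sep fuel l cur accL =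
        accL.reverse ++ (pvPieces sep l).modifyHead (cur.reverse ++ ·) := by
  intro fuel
  induction fuel with
  | zero => intro l cur acc accL h; omega
  | succ f ih =>
      intro l cur _acc accL h
      cases l with
      | nil =>
          rw [pvPieces]
          simp [PySem.Chars.splitOn.go, hsep, find_nil_of_ne sep hsep]
      | cons c t =>
          by_cases hp : sep.isPrefixOf (c :: t)
          · -- delimiter at the front: flush cur, drop sep
            have hfind : PySem.Chars.find (c :: t) sep = 0 := find_of_prefix sep _ hsep hp
            have hpos : 0 < sep.length := List.length_pos_iff.mpr hsep
            have hlen : ((c :: t).drop sep.length).length < f := by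
              simp [List.length_drop]; simp at h; omega
            rw [show PySem.Chars.splitOn.go sep (f + 1) (c :: t) cur accL
                  = PySem.Chars.splitOn.go sep f ((c :: t).drop sep.length) [] (cur.reverse :: accL) by
                simp [PySem.Chars.splitOn.go, hp]]
            rw [ih ((c :: t).drop sep.length) [] [] (cur.reverse :: accL) hlen]
            have hne : PySem.Chars.find (c :: t) sep ≠ -1 := by rw [hfind]; decide
            rw [show pvPieces sep (c :: t)
                  = [] :: pvPieces sep ((c :: t).drop sep.length) by
                rw [pvPieces]; simp [hsep, hfind]]
            cases hpc : pvPieces sep ((c :: t).drop sep.length) with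
            | nil => exact absurd hpc (pvPieces_ne_nil sep _)
            | cons p ps => simp
          · -- no delimiter at the front: move one char into cur
            have hlen : t.length < f := by simp at h; omega
            rw [show PySem.Chars.splitOn.go sep (f + 1) (c :: t) cur accL
                  = PySem.Chars.splitOn.go sep f t (c :: cur) accL by
                simp [PySem.Chars.splitOn.go, hp]]
            rw [ih t (c :: cur) [] accL hlen]
            have hrec := find_cons_not_prefix sep c t hsep hp
            by_cases hft : PySem.Chars.find t sep = -1
            · have hfl : PySem.Chars.find (c :: t) sep = -1 := by rw [hrec, if_pos hft]
              rw [pvPieces, pvPieces]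
              simp [hsep, hfl, hft]
            · have hnn : 0 ≤ PySem.Chars.find t sep :=
                (PySem.Chars.find_nonneg_iff t sep).mpr
                  ((PySem.Chars.find_ne_neg_one_iff t sep).mp hft)
              have hfl : PySem.Chars.find (c :: t) sep = PySem.Chars.find t sep + 1 := by
                rw [hrec, if_neg hft]
              have hflne : PySem.Chars.find (c :: t) sep ≠ -1 := by rw [hfl]; omega
              rw [pvPieces, pvPieces]
              simp only [hsep, dif_neg, hft, hflne, not_false_iff]
              have htn : (PySem.Chars.find (c :: t) sep).toNat
                  = (PySem.Chars.find t sep).toNat + 1 := by rw [hfl]; omega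
              rw [htn]
              cases hpc : pvPieces sep (t.drop ((PySem.Chars.find t sep).toNat + sep.length)) with
              | nil => exact absurd hpc (pvPieces_ne_nil sep _)
              | cons p ps =>
                  rw [show (PySem.Chars.find t sep).toNat + 1 + sep.length
                        = (PySem.Chars.find t sep).toNat + sep.length + 1 by omega]
                  rw [List.drop_succ_cons, hpc]
                  simp [List.take_succ_cons]

lemma splitOn_eq_pvPieces (sep l : List Char) (hsep : sep ≠ []) :
    PySem.Chars.splitOn l sep = pvPieces sep l := by
  unfold PySem.Chars.splitOn
  rw [splitOn_go_spec sep hsep (l.length + 1) l [] [] [] (by omega)]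
  cases hpc : pvPieces sep l with
  | nil => exact absurd hpc (pvPieces_ne_nil sep l)
  | cons p ps => simp

lemma take_cut (sep l : List Char) (i : Nat) (hp : sep <+: l.drop i) (hi : i ≤ l.length) :
    l.take (i + sep.length) = l.take i ++ sep := by
  rw [List.take_add]
  congr 1
  obtain ⟨t, ht⟩ := hp
  rw [← ht]
  simp

lemma addSep_pieces_eq_scan (sep : List Char) (hsep : sep ≠ []) :
    ∀ (l : List Char), pvAddSep sep (pvPieces sep l) = pvScan sep l := by
  intro l
  induction hn : l.length using Nat.strong_induction_on generalizing l with
  | _ n ih =>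
      subst hn
      rw [pvPieces, pvScan]
      by_cases hfind : PySem.Chars.find l sep = -1
      · simp [hsep, hfind, pvAddSep]
      · simp only [hsep, dif_neg, hfind, not_false_iff]
        have hinf : sep <:+: l := (PySem.Chars.find_ne_neg_one_iff l sep).mp hfind
        have hnn : 0 ≤ PySem.Chars.find l sep := (PySem.Chars.find_nonneg_iff l sep).mpr hinf
        have hspec := (PySem.Chars.find_spec hnn).1
        have hlen : sep.length ≤ (l.drop (PySem.Chars.find l sep).toNat).length :=
          hspec.length_le
        have hflen : PySem.Chars.find l sep ≤ l.length := PySem.Chars.find_le_length l sep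
        rw [List.length_drop] at hlen
        have hpos : 0 < sep.length := List.length_pos_iff.mpr hsep
        have hdec : (l.drop ((PySem.Chars.find l sep).toNat + sep.length)).length < l.length := by
          rw [List.length_drop]; omega
        have hih := ih _ hdec (l.drop ((PySem.Chars.find l sep).toNat + sep.length)) rfl
        cases hpc : pvPieces sep (l.drop ((PySem.Chars.find l sep).toNat + sep.length)) with
        | nil => exact absurd hpc (pvPieces_ne_nil sep _)
        | cons p ps =>
            rw [hpc] at hih
            show pvAddSep sep (_ :: p :: ps) = _
            rw [pvAddSep, hih]
            rw [take_cut sep l (PySem.Chars.find l sep).toNat hspec (by omega)]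

lemma main_eq (sep l : List Char) (hsep : sep ≠ []) :
    pvAddSep sep (PySem.Chars.splitOn l sep) = pvScan sep l := by
  rw [splitOn_eq_pvPieces sep l hsep, addSep_pieces_eq_scan sep hsep l]

-- ===== VERDICT (by name: the statement is the Claim_ definition above) =====
theorem split_into_units_py_spec : Claim_equal_split_into_units_py := by
  intro text split_by _hdom hpre
  unfold Spec_split_into_units_py split_into_units_py split_into_units_py_alt
  rcases hpre with h | h | h <;> subst h
  · show List.map String.mk (pvAddSep "\n\n".toList (PySem.Chars.splitOn text.toList "\n\n".toList))
        = List.map String.mk (pvScan "\n\n".toList text.toList)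
    rw [main_eq _ text.toList (by decide)]
  · show List.map String.mk (pvAddSep ".".toList (PySem.Chars.splitOn text.toList ".".toList))
        = List.map String.mk (pvScan ".".toList text.toList)
    rw [main_eq _ text.toList (by decide)]
  · show List.map String.mk (pvAddSep " ".toList (PySem.Chars.splitOn text.toList " ".toList))
        = List.map String.mk (pvScan " ".toList text.toList)
    rw [main_eq _ text.toList (by decide)]
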